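-- pv_equiv track=rewrite | github.com/qsdrqs/dotfiles | tools/split_plugins.py | backtrack_chunk_start
-- ===== SOURCE A (Python) =====
-- def backtrack_chunk_start(source: str, pos: int) -> int:
--     start = pos
--     # include the current line
--     line_break = source.rfind("\n", 0, start)
--     start = 0 if line_break == -1 else line_break + 1
--
--     probe = start
--     while probe > 0:
--         prev_break = source.rfind("\n", 0, probe - 1)
--         line_start = 0 if prev_break == -1 else prev_break + 1
--         line = source[line_start:probe].strip()
--         if line == "" or line.startswith("--"):
--             probe = line_start
--             start = line_start
--             continue
--         break
--     return start
-- ===== SOURCE B (Python) =====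
-- def backtrack_chunk_start(source: str, pos: int) -> int:
--     # One forward character pass over the prefix up to the last newline before pos,
--     # instead of A's repeated backward rfind scans.
--     prefix = source[:pos]
--     cut = prefix.rfind("\n") + 1
--     start, off, buf = 0, 0, ""
--     for ch in prefix[:cut]:
--         off += 1
--         if ch == "\n":
--             s = buf.strip()
--             if not (s == "" or s.startswith("--")):
--                 start = off
--             buf = ""
--         else:
--             buf += ch
--     return start
-- ===== Notes on version B (the rewrite author's own statement) =====
-- stated objective: alternative
-- what changed: Replaces A's backward walk with repeated rfind scans by a single forward character pass over the prefix up to the last newline, folding a (start, offset, line-buffer) state and updating start after each non-blank non-comment line.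
import Mathlib
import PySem

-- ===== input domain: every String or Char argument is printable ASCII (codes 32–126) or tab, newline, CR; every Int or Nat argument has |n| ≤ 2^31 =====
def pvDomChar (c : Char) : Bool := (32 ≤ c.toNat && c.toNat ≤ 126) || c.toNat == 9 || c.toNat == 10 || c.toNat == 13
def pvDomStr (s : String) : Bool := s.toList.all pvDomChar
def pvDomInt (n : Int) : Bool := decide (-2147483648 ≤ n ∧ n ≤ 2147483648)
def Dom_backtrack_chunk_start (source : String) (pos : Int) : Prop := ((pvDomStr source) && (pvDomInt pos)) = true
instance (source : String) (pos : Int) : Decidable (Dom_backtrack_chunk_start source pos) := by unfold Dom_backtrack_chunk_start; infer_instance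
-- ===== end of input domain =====

-- B replaces A's backward walk (repeated rfind scans) by ONE forward character pass over the
-- prefix up to the last newline before pos (objective: alternative; same O(n) cost).

-- ===== PORT A =====
-- The next three lemmas exist only for the termination proof of A's while-loop (cited in
-- decreasing_by): a successful rfind points strictly inside the searched prefix, so
-- `line_start` is a strictly smaller non-negative index than `probe`.
lemma pvGoSpec (s sub : List Char) (j : Nat) :
    (PySem.Chars.rfind.go s sub j = -1 ∧ ∀ i : Nat, i ≤ j → sub.isPrefixOf (s.drop i) = false) ∨
    (∃ k : Nat, PySem.Chars.rfind.go s sub j = (k : Int) ∧ k ≤ j ∧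
      sub.isPrefixOf (s.drop k) = true ∧
      ∀ i : Nat, k < i → i ≤ j → sub.isPrefixOf (s.drop i) = false) := by
  induction j with
  | zero =>
    by_cases hp : sub.isPrefixOf s = true
    · right; exact ⟨0, by simp [PySem.Chars.rfind.go, hp], Nat.le_refl 0, by simpa using hp,
        fun i h1 h2 => absurd (Nat.lt_of_lt_of_le h1 h2) (by omega)⟩
    · left
      constructor
      · simp [PySem.Chars.rfind.go, hp]
      · intro i hi; interval_cases i; exact Bool.eq_false_iff.mpr hp
  | succ j ih =>
    by_cases hp : sub.isPrefixOf (s.drop (j+1)) = true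
    · right
      exact ⟨j+1, by simp [PySem.Chars.rfind.go, hp], Nat.le_refl _, hp,
        fun i h1 h2 => absurd (Nat.lt_of_lt_of_le h1 h2) (by omega)⟩
    · have hgo : PySem.Chars.rfind.go s sub (j+1) = PySem.Chars.rfind.go s sub j := by
        simp [PySem.Chars.rfind.go, hp]
      rcases ih with ⟨h1, h2⟩ | ⟨k, hk1, hk2, hk3, hk4⟩
      · left
        refine ⟨hgo ▸ h1, fun i hi => ?_⟩
        rcases Nat.lt_or_ge i (j+1) with h | h
        · exact h2 i (by omega)
        · have : i = j + 1 := by omega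
          subst this; exact Bool.eq_false_iff.mpr hp
      · right
        refine ⟨k, hgo ▸ hk1, by omega, hk3, fun i hlt hle => ?_⟩
        rcases Nat.lt_or_ge i (j+1) with h | h
        · exact hk4 i hlt (by omega)
        · have : i = j + 1 := by omega
          subst this; exact Bool.eq_false_iff.mpr hp

lemma pvRfindFromZero (s sub : List Char) (e : Int) :
    PySem.Chars.rfindFrom s sub 0 (some e) =
      PySem.Chars.rfind (s.take (PySem.List.clampIdx s.length e)) sub := by
  have hclamp : (if (s.length:Int) < e then (s.length:Int)
      else if e < 0 then if e + ↑s.length < 0 then 0 else e + ↑s.length else e).toNat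
      = PySem.List.clampIdx s.length e := by
    simp only [PySem.List.clampIdx]
    split_ifs <;> omega
  simp only [PySem.Chars.rfindFrom]
  norm_num
  rw [hclamp]
  have hge : ¬ ((if (s.length:Int) < e then (s.length:Int)
      else if e < 0 then if e + ↑s.length < 0 then 0 else e + ↑s.length else e) < 0) := by
    split_ifs <;> omega
  rw [if_neg hge]
  split <;> omega

lemma pvLineStartLt (s : List Char) (probe : Int) (h : 0 < probe) :
    0 ≤ (if PySem.Chars.rfindFrom s ['\n'] 0 (some (probe - 1)) == -1 then (0 : Int)
         else PySem.Chars.rfindFrom s ['\n'] 0 (some (probe - 1)) + 1) ∧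
    (if PySem.Chars.rfindFrom s ['\n'] 0 (some (probe - 1)) == -1 then (0 : Int)
         else PySem.Chars.rfindFrom s ['\n'] 0 (some (probe - 1)) + 1) < probe := by
  rw [pvRfindFromZero]
  have hm : (PySem.List.clampIdx s.length (probe - 1) : Int) ≤ probe - 1 := by
    simp only [PySem.List.clampIdx]; split_ifs <;> omega
  have hlen : ((s.take (PySem.List.clampIdx s.length (probe - 1))).length : Int) ≤ probe - 1 := by
    simp only [List.length_take]; omega
  rcases pvGoSpec (s.take (PySem.List.clampIdx s.length (probe - 1))) ['\n']
      (s.take (PySem.List.clampIdx s.length (probe - 1))).length with ⟨h1, _⟩ | ⟨k, hk1, _, hk3, _⟩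
  · rw [PySem.Chars.rfind, h1]; simp; omega
  · have hkl : k < (s.take (PySem.List.clampIdx s.length (probe - 1))).length := by
      have hpre : ['\n'] <+: (s.take (PySem.List.clampIdx s.length (probe - 1))).drop k := by
        simpa using hk3
      by_contra hh
      rw [List.drop_eq_nil_of_le (by omega)] at hpre
      simpa using List.prefix_nil.mp hpre
    rw [PySem.Chars.rfind, hk1]
    have : ((k:Int) == -1) = false := by simp
    rw [this]
    simp; omega

-- A's while-loop: state (probe, start); `continue` = recursive call, `break`/loop exit = return start.
def bcsLoop (source : List Char) (probe start : Int) : Int :=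
  if h : 0 < probe then
    let prev_break := PySem.Chars.rfindFrom source ['\n'] 0 (some (probe - 1))
    let line_start : Int := if prev_break == -1 then 0 else prev_break + 1
    let line := PySem.Chars.strip (PySem.Chars.slice source (some line_start) (some probe))
    if line == [] || PySem.Chars.startswith line ['-', '-'] then
      bcsLoop source line_start line_start
    else start
  else start
termination_by probe.toNat
decreasing_by
  have h2 := pvLineStartLt source probe h
  by_cases hc : PySem.Chars.rfindFrom source ['\n'] 0 (some (probe - 1)) == -1 <;>
    simp [hc] at h2 ⊢ <;> omega

def backtrack_chunk_start (source : String) (pos : Int) : Int :=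
  let start := pos
  let line_break := PySem.Chars.rfindFrom source.toList ['\n'] 0 (some start)
  let start : Int := if line_break == -1 then 0 else line_break + 1
  bcsLoop source.toList start start

-- ===== PORT B =====
-- the body of B's single for-loop over the characters; state (start, off, buf)
def pvStep (st : Int × Int × List Char) (ch : Char) : Int × Int × List Char :=
  let off := st.2.1 + 1
  if ch == '\n' then
    let s := PySem.Chars.strip st.2.2
    if !(s == [] || PySem.Chars.startswith s ['-', '-']) then (off, off, [])
    else (st.1, off, [])
  else (st.1, off, st.2.2 ++ [ch])

def backtrack_chunk_start_alt (source : String) (pos : Int) : Int :=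
  let pre := PySem.Chars.slice source.toList none (some pos)
  let cut := PySem.Chars.rfind pre ['\n'] + 1
  ((PySem.Chars.slice pre none (some cut)).foldl pvStep (0, 0, [])).1

-- ===== PRECONDITION & SPEC =====
def Spec_backtrack_chunk_start (source : String) (pos : Int) (out : Int) : Prop := out = backtrack_chunk_start_alt source pos
instance (source : String) (pos : Int) (out : Int) : Decidable (Spec_backtrack_chunk_start source pos out) := by unfold Spec_backtrack_chunk_start; infer_instance

-- ===== CLAIM (what is proved, stated in full; the proofs are below) =====
def Claim_equal_backtrack_chunk_start : Prop := ∀ (source : String) (pos : Int), Dom_backtrack_chunk_start source pos → Spec_backtrack_chunk_start source pos (backtrack_chunk_start source pos)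

-- ===== LEMMAS AND PROOFS =====

-- a singleton pattern is a prefix iff the first element matches
lemma pvSingletonPrefix (c : Char) (l : List Char) :
    [c].isPrefixOf l = true ↔ l.head? = some c := by
  cases l with
  | nil => simp [List.isPrefixOf]
  | cons h t => simp only [List.isPrefixOf, List.head?, Option.some.injEq, Bool.and_eq_true,
      beq_iff_eq, and_true]; exact ⟨Eq.symm, Eq.symm⟩

-- rfind of '\n' on q ++ t, where q is empty or ends with '\n' and t is newline-free
lemma pvRfindLastNL (q t : List Char) (hq : q = [] ∨ ∃ u, q = u ++ ['\n'])
    (ht : '\n' ∉ t) : PySem.Chars.rfind (q ++ t) ['\n'] = (q.length : Int) - 1 := by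
  have hdropT : ∀ i : Nat, q.length ≤ i → (['\n'].isPrefixOf ((q ++ t).drop i)) = false := by
    intro i hi
    rw [Bool.eq_false_iff]
    intro hc
    rw [pvSingletonPrefix] at hc
    have : (q ++ t).drop i = t.drop (i - q.length) := by
      rw [List.drop_append]
      simp [List.drop_eq_nil_of_le hi]
    rw [this] at hc
    exact ht (List.mem_of_mem_drop (List.mem_of_mem_head? hc))
  rcases pvGoSpec (q ++ t) ['\n'] (q ++ t).length with ⟨h1, h2⟩ | ⟨k, hk1, hk2, hk3, hk4⟩
  · rcases hq with rfl | ⟨u, rfl⟩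
    · simpa [PySem.Chars.rfind] using h1
    · exfalso
      have := h2 u.length (by simp)
      rw [Bool.eq_false_iff] at this
      apply this
      rw [pvSingletonPrefix]
      rw [show u ++ ['\n'] ++ t = u ++ ('\n' :: t) by simp]
      rw [List.drop_left' (l₁ := u) rfl]
      simp
  · rcases hq with rfl | ⟨u, rfl⟩
    · exfalso
      have := hdropT k (by simp)
      rw [hk3] at this; exact Bool.true_eq_false ▸ this.symm ▸ rfl
    · have hklt : k < (u ++ ['\n']).length := by
        by_contra hh
        have := hdropT k (by omega)
        rw [hk3] at this; cases this
      have hkge : u.length ≤ k := by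
        by_contra hh
        have hpre : (['\n'].isPrefixOf (((u ++ ['\n']) ++ t).drop u.length)) = true := by
          rw [pvSingletonPrefix]
          rw [show (u ++ ['\n']) ++ t = u ++ ('\n' :: t) by simp]
          rw [List.drop_left' (l₁ := u) rfl]
          simp
        have := hk4 u.length (by omega) (by simp)
        rw [hpre] at this; cases this
      have : k = u.length := by simp at hklt; omega
      subst this
      rw [PySem.Chars.rfind, hk1]
      simp

-- any list splits as ('\n'-terminated part) ++ (newline-free tail)
lemma pvDecomp (p : List Char) :
    ∃ q r, p = q ++ r ∧ (q = [] ∨ ∃ u, q = u ++ ['\n']) ∧ '\n' ∉ r := by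
  induction p using List.reverseRecOn with
  | nil => exact ⟨[], [], by simp, Or.inl rfl, by simp⟩
  | append_singleton p' c ih =>
    by_cases hc : c = '\n'
    · subst hc
      exact ⟨p' ++ ['\n'], [], by simp, Or.inr ⟨p', rfl⟩, by simp⟩
    · obtain ⟨q, r, h1, h2, h3⟩ := ih
      exact ⟨q, r ++ [c], by simp [h1], h2, by
        intro hm
        rcases List.mem_append.mp hm with h | h
        · exact h3 h
        · simp at h; exact hc h.symm⟩

def pvFlat (bs : List (List Char)) : List Char := (bs.map (· ++ ['\n'])).flatten

lemma pvFlatAppend (bs : List (List Char)) (L : List Char) :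
    pvFlat (bs ++ [L]) = pvFlat bs ++ L ++ ['\n'] := by
  simp [pvFlat]

lemma pvFlatNice (bs : List (List Char)) :
    pvFlat bs = [] ∨ ∃ u, pvFlat bs = u ++ ['\n'] := by
  induction bs using List.reverseRecOn with
  | nil => exact Or.inl rfl
  | append_singleton bs' L ih =>
    right
    exact ⟨pvFlat bs' ++ L, by rw [pvFlatAppend]⟩

-- a '\n'-terminated chunk is a concatenation of newline-free lines
lemma pvBlocks (q : List Char) (hq : q = [] ∨ ∃ u, q = u ++ ['\n']) :
    ∃ bs : List (List Char), q = pvFlat bs ∧ ∀ L ∈ bs, '\n' ∉ L := by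
  induction hn : q.length using Nat.strong_induction_on generalizing q with
  | _ n ih =>
    rcases hq with rfl | ⟨u, rfl⟩
    · exact ⟨[], rfl, by simp⟩
    · obtain ⟨q₂, r₂, h1, h2, h3⟩ := pvDecomp u
      have hlen : q₂.length < n := by
        subst hn; rw [h1]; simp
      obtain ⟨bs₂, hb1, hb2⟩ := ih q₂.length hlen q₂ h2 rfl
      refine ⟨bs₂ ++ [r₂], ?_, ?_⟩
      · rw [pvFlatAppend, ← hb1, h1]
      · intro L hL
        rcases List.mem_append.mp hL with h | h
        · exact hb2 L h
        · simp at h; subst h; exact h3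

lemma pvStripSnocNL (L : List Char) :
    PySem.Chars.strip (L ++ ['\n']) = PySem.Chars.strip L := by
  simp only [PySem.Chars.strip, PySem.Chars.lstrip, PySem.Chars.rstrip]
  have hsp : PySem.Chars.isspace '\n' = true := by decide
  by_cases h : L.dropWhile PySem.Chars.isspace = []
  · rw [List.dropWhile_append]
    simp [List.isEmpty_iff, h, hsp]
  · rw [List.dropWhile_append]
    simp [h, hsp]

-- B's fold over a newline-free run only lengthens the buffer
lemma pvFoldRun (L : List Char) (h : '\n' ∉ L) (st off : Int) (buf : List Char) :
    L.foldl pvStep (st, off, buf) = (st, off + L.length, buf ++ L) := by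
  induction L generalizing off buf with
  | nil => simp
  | cons c cs ih =>
    have hc : (c == '\n') = false := by
      simp; intro hh; exact h (hh ▸ List.mem_cons_self ..)
    simp only [List.foldl_cons]
    rw [show pvStep (st, off, buf) c = (st, off + 1, buf ++ [c]) from by simp [pvStep, hc]]
    rw [ih (fun hm => h (List.mem_cons_of_mem _ hm)) (off + 1) (buf ++ [c])]
    refine Prod.ext rfl (Prod.ext ?_ ?_) <;> simp
    ring

-- one unfolding of A's loop at a block boundary
lemma pvLoopStep (F L rest : List Char) (hnice : F = [] ∨ ∃ u, F = u ++ ['\n'])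
    (hL : '\n' ∉ L) :
    bcsLoop (F ++ (L ++ '\n' :: rest)) ((F.length : Int) + L.length + 1)
        ((F.length : Int) + L.length + 1)
      = if (PySem.Chars.strip L == [] || PySem.Chars.startswith (PySem.Chars.strip L) ['-', '-'])
        then bcsLoop (F ++ (L ++ '\n' :: rest)) (F.length : Int) (F.length : Int)
        else (F.length : Int) + L.length + 1 := by
  have hpos : (0:Int) < (F.length : Int) + L.length + 1 := by positivity
  rw [bcsLoop, dif_pos hpos]
  have e2 : (F.length : Int) + L.length + 1 - 1 = ((F.length + L.length : Nat) : Int) := by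
    push_cast; ring
  rw [e2, pvRfindFromZero]
  have e3 : PySem.List.clampIdx (F ++ (L ++ '\n' :: rest)).length
      ((F.length + L.length : Nat) : Int) = F.length + L.length := by
    simp only [PySem.List.clampIdx, List.length_append, List.length_cons]
    rw [if_neg (by omega)]
    omega
  rw [e3]
  have e4 : (F ++ (L ++ '\n' :: rest)).take (F.length + L.length) = F ++ L := by
    rw [show F ++ (L ++ '\n' :: rest) = (F ++ L) ++ ('\n' :: rest) by simp]
    exact List.take_left' (by simp)
  rw [e4, pvRfindLastNL F L hnice hL]
  simp only []
  have e5 : (if ((F.length : Int) - 1 == -1) then (0:Int) else (F.length : Int) - 1 + 1)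
      = (F.length : Int) := by
    by_cases hF0 : F.length = 0
    · simp [hF0]
    · rw [if_neg (by simp only [beq_iff_eq]; omega)]
      omega
  rw [e5]
  have e6 : PySem.Chars.slice (F ++ (L ++ '\n' :: rest)) (some (F.length : Int))
      (some ((F.length : Int) + L.length + 1)) = L ++ ['\n'] := by
    rw [PySem.Chars.slice_eq_listSlice]
    rw [show (F.length : Int) + L.length + 1 = ((F.length + L.length + 1 : Nat) : Int) by push_cast; ring]
    rw [PySem.List.slice_natCast]
    rw [List.drop_left' (l₁ := F) rfl]
    rw [show F.length + L.length + 1 - F.length = L.length + 1 by omega]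
    rw [List.take_append]
    simp
  rw [e6, pvStripSnocNL]

-- the heart: A's backward loop over the blocks equals B's forward fold
lemma pvMain (bs : List (List Char)) (h : ∀ L ∈ bs, '\n' ∉ L) :
    ∃ v : Int, (pvFlat bs).foldl pvStep (0, 0, []) = (v, ((pvFlat bs).length : Int), []) ∧
      ∀ rest : List Char,
        bcsLoop (pvFlat bs ++ rest) ((pvFlat bs).length : Int) ((pvFlat bs).length : Int) = v := by
  induction bs using List.reverseRecOn with
  | nil =>
    refine ⟨0, by simp [pvFlat], fun rest => ?_⟩
    rw [bcsLoop]
    simp [pvFlat]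
  | append_singleton bs L ihfull =>
    have hL : '\n' ∉ L := h L (by simp)
    obtain ⟨v, hfold, hloop⟩ := ihfull (fun M hM => h M (by simp [hM]))
    have hnice := pvFlatNice bs
    have hlen : ((pvFlat (bs ++ [L])).length : Int)
        = ((pvFlat bs).length : Int) + L.length + 1 := by
      rw [pvFlatAppend]
      push_cast [List.length_append, List.length_singleton]
      ring
    refine ⟨if (PySem.Chars.strip L == [] || PySem.Chars.startswith (PySem.Chars.strip L) ['-', '-'])
        then v else ((pvFlat bs).length : Int) + L.length + 1, ?_, ?_⟩
    · rw [pvFlatAppend, show pvFlat bs ++ L ++ ['\n'] = pvFlat bs ++ (L ++ ['\n']) by simp]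
      rw [List.foldl_append, hfold, List.foldl_append]
      rw [pvFoldRun L hL]
      simp only [List.foldl_cons, List.foldl_nil, List.nil_append]
      rw [show pvStep (v, ((pvFlat bs).length : Int) + L.length, L) '\n'
          = (if (PySem.Chars.strip L == [] || PySem.Chars.startswith (PySem.Chars.strip L) ['-', '-'])
              then v else ((pvFlat bs).length : Int) + L.length + 1,
             ((pvFlat bs).length : Int) + L.length + 1, ([] : List Char)) from by
        by_cases hs : (PySem.Chars.strip L == []) = true <;>
          by_cases hb : (PySem.Chars.startswith (PySem.Chars.strip L) ['-', '-']) = true <;>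
            simp [pvStep, hs, hb]]
      refine Prod.ext rfl (Prod.ext ?_ rfl)
      simp [List.length_append]
      omega
    · intro rest
      rw [show pvFlat (bs ++ [L]) ++ rest = pvFlat bs ++ (L ++ '\n' :: rest) by
        rw [pvFlatAppend]; simp]
      rw [hlen, pvLoopStep (pvFlat bs) L rest hnice hL]
      by_cases hc : (PySem.Chars.strip L == [] || PySem.Chars.startswith (PySem.Chars.strip L) ['-', '-']) = true
      · rw [if_pos hc, if_pos hc]
        exact hloop (L ++ '\n' :: rest)
      · rw [if_neg hc, if_neg hc]

-- assembling both ports around the decomposition prefix = lines ++ newline-free tail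
lemma pvAssemble (cs : List Char) (pos : Int) :
    (let line_break := PySem.Chars.rfindFrom cs ['\n'] 0 (some pos)
     let start : Int := if line_break == -1 then 0 else line_break + 1
     bcsLoop cs start start)
    = (let pre := PySem.Chars.slice cs none (some pos)
       let cut := PySem.Chars.rfind pre ['\n'] + 1
       ((PySem.Chars.slice pre none (some cut)).foldl pvStep (0, 0, [])).1) := by
  have hplist : PySem.Chars.slice cs none (some pos)
      = cs.take (PySem.List.clampIdx cs.length pos) := by
    rw [PySem.Chars.slice_eq_listSlice]
    simp [PySem.List.slice]
  obtain ⟨q, r, hqr, hqnice, hrfree⟩ := pvDecomp (PySem.Chars.slice cs none (some pos))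
  obtain ⟨bs, hbs, hbsfree⟩ := pvBlocks q hqnice
  obtain ⟨v, hfold, hloop⟩ := pvMain bs hbsfree
  have hrfind : PySem.Chars.rfind (PySem.Chars.slice cs none (some pos)) ['\n']
      = (q.length : Int) - 1 := by
    rw [hqr]; exact pvRfindLastNL q r hqnice hrfree
  have hA1 : PySem.Chars.rfindFrom cs ['\n'] 0 (some pos) = (q.length : Int) - 1 := by
    rw [pvRfindFromZero, ← hplist, hrfind]
  have hq : q = pvFlat bs := hbs
  have hcs : cs = pvFlat bs ++ (r ++ cs.drop (PySem.List.clampIdx cs.length pos)) := by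
    conv_lhs => rw [← List.take_append_drop (PySem.List.clampIdx cs.length pos) cs]
    rw [← hplist, hqr, hq]
    simp
  -- the A side
  have hAstart : (if (PySem.Chars.rfindFrom cs ['\n'] 0 (some pos) == -1) then (0:Int)
      else PySem.Chars.rfindFrom cs ['\n'] 0 (some pos) + 1) = (q.length : Int) := by
    rw [hA1]
    by_cases h0 : q.length = 0
    · simp [h0]
    · rw [if_neg (by simp only [beq_iff_eq]; omega)]
      omega
  -- the B side
  have hsliceB : PySem.Chars.slice (PySem.Chars.slice cs none (some pos)) none
      (some (PySem.Chars.rfind (PySem.Chars.slice cs none (some pos)) ['\n'] + 1)) = q := by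
    rw [hrfind, show (q.length : Int) - 1 + 1 = ((q.length : Nat) : Int) by omega]
    rw [PySem.Chars.slice_eq_listSlice, PySem.List.slice_to_natCast]
    rw [hqr]
    exact List.take_left' rfl
  show bcsLoop cs
      (if (PySem.Chars.rfindFrom cs ['\n'] 0 (some pos) == -1) then (0:Int)
        else PySem.Chars.rfindFrom cs ['\n'] 0 (some pos) + 1)
      (if (PySem.Chars.rfindFrom cs ['\n'] 0 (some pos) == -1) then (0:Int)
        else PySem.Chars.rfindFrom cs ['\n'] 0 (some pos) + 1)
    = ((PySem.Chars.slice (PySem.Chars.slice cs none (some pos)) none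
        (some (PySem.Chars.rfind (PySem.Chars.slice cs none (some pos)) ['\n'] + 1))).foldl
          pvStep (0, 0, [])).1
  rw [hAstart, hsliceB, hq, hfold]
  conv_lhs => rw [hcs]
  exact hloop (r ++ cs.drop (PySem.List.clampIdx cs.length pos))

-- ===== VERDICT (by name: the statement is the Claim_ definition above) =====
theorem backtrack_chunk_start_spec : Claim_equal_backtrack_chunk_start := by
  intro source pos _
  unfold Spec_backtrack_chunk_start backtrack_chunk_start backtrack_chunk_start_alt
  exact pvAssemble source.toList pos
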